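-- pv_equiv track=rewrite | github.com/gsittyz/self_study | inshi/inshi_2015_2.py | f_count_even
-- ===== SOURCE A (Python) =====
-- def f_count_even(n):
--     res = 1
--     count = 0
--     for _ in range(n):
--         res = (161 * res + 2457) % (2**24)
--         if (res % 2 == 0):
--             count += 1
--     return count
-- ===== SOURCE B (Python) =====
-- def f_count_even(n):
--     # res starts odd; each step flips parity (161 and 2457 odd, modulus even),
--     # so the outputs are even on steps 1,3,5,... -> ceil(n/2) evens.
--     if n <= 0:
--         return 0
--     return (n + 1) // 2
-- ===== Notes on version B (the rewrite author's own statement) =====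
-- stated objective: faster
-- what changed: Replaces the O(n) LCG simulation by the closed form (n+1)//2: the multiplier and increment are odd and the modulus even, so the state's parity alternates starting even at step 1.
import Mathlib
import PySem

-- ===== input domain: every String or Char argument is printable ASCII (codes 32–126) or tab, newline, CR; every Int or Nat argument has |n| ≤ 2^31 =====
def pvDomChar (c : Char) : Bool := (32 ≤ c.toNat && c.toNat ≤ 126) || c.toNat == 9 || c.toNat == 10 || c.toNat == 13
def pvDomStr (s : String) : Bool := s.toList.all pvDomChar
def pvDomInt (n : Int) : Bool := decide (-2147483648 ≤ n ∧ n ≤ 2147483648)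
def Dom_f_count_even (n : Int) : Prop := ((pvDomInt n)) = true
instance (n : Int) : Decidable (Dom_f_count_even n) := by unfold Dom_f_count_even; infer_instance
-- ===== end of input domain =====

-- B replaces the O(n) LCG loop by the closed form (n+1)//2 (parity of the state alternates); proved equal on all Int inputs.


-- ===== PORT A =====
-- one loop iteration: res = (161*res + 2457) % 2**24; if res % 2 == 0: count += 1
def fceStep (s : Int × Int) (_ : Int) : Int × Int :=
  let res := PySem.Int.mod (161 * s.1 + 2457) (2 ^ 24)
  (res, if PySem.Int.mod res 2 = 0 then s.2 + 1 else s.2)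

def f_count_even (n : Int) : Int :=
  ((PySem.List.pyRange 0 n 1).foldl fceStep (1, 0)).2

-- ===== PORT B =====
def f_count_even_alt (n : Int) : Int :=
  if n ≤ 0 then 0 else PySem.Int.floordiv (n + 1) 2

-- ===== PRECONDITION & SPEC =====
def Spec_f_count_even (n : Int) (out : Int) : Prop := out = f_count_even_alt n
instance (n : Int) (out : Int) : Decidable (Spec_f_count_even n out) := by unfold Spec_f_count_even; infer_instance

-- ===== CLAIM (what is proved, stated in full; the proofs are below) =====
def Claim_equal_f_count_even : Prop := ∀ (n : Int), Dom_f_count_even n → Spec_f_count_even n (f_count_even n)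

-- ===== LEMMAS AND PROOFS =====

-- loop invariant: after k iterations the state's parity is (k+1) % 2 and count = (k+1)/2
theorem fce_loop_inv (k : Nat) :
    ((PySem.List.pyRange 0 k 1).foldl fceStep (1, 0)).1 % 2 = (if k % 2 = 0 then 1 else 0) ∧
    ((PySem.List.pyRange 0 k 1).foldl fceStep (1, 0)).2 = ((k + 1) / 2 : Nat) := by
  induction k with
  | zero => simp [PySem.List.pyRange_one_eq_nil]
  | succ m ih =>
    have hle : (0 : Int) ≤ (m : Int) := by positivity
    have hcast : ((m : Nat) + 1 : Int) = ((m : Int)) + 1 := by push_cast; ring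
    rw [show ((m + 1 : Nat) : Int) = (m : Int) + 1 by push_cast; ring,
        PySem.List.pyRange_one_succ_right hle, List.foldl_append]
    obtain ⟨hres, hcnt⟩ := ih
    set s := (PySem.List.pyRange 0 m 1).foldl fceStep (1, 0) with hs
    simp only [List.foldl_cons, List.foldl_nil, fceStep]
    have h2 : (0 : Int) < 2 := by norm_num
    have h24 : (0 : Int) < 2 ^ 24 := by norm_num
    have hm1 : PySem.Int.mod (161 * s.1 + 2457) (2 ^ 24) % 2 = (161 * s.1 + 2457) % 2 := by
      rw [PySem.Int.mod_eq_emod_of_pos h24]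
      exact Int.emod_emod_of_dvd _ (by norm_num)
    have hm2 : PySem.Int.mod (PySem.Int.mod (161 * s.1 + 2457) (2 ^ 24)) 2
        = PySem.Int.mod (161 * s.1 + 2457) (2 ^ 24) % 2 :=
      PySem.Int.mod_eq_emod_of_pos h2
    rcases Nat.even_or_odd m with he | ho
    · have hme : m % 2 = 0 := Nat.even_iff.mp he
      have hr : s.1 % 2 = 1 := by rw [hres, if_pos hme]
      have hpar : (161 * s.1 + 2457) % 2 = 0 := by omega
      constructor
      · simp only [hm1, hpar]
        have : (m + 1) % 2 = 1 := by omega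
        simp [this]
      · rw [hm2, hm1, hpar]
        simp only [hcnt]
        push_cast
        omega
    · have hmo : m % 2 = 1 := Nat.odd_iff.mp ho
      have hr : s.1 % 2 = 0 := by rw [hres]; simp [hmo]
      have hpar : (161 * s.1 + 2457) % 2 = 1 := by omega
      constructor
      · simp only [hm1, hpar]
        have : (m + 1) % 2 = 0 := by omega
        simp [this]
      · rw [hm2, hm1, hpar]
        simp only [if_neg (by norm_num : (1 : Int) ≠ 0), hcnt]
        push_cast
        omega

-- ===== VERDICT (by name: the statement is the Claim_ definition above) =====
theorem f_count_even_spec : Claim_equal_f_count_even := by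
  intro n _
  unfold Spec_f_count_even f_count_even f_count_even_alt
  by_cases hn : n ≤ 0
  · rw [PySem.List.pyRange_one_eq_nil hn]
    simp [hn]
  · have h0 : (0 : Int) ≤ n := by omega
    lift n to ℕ using h0 with k
    rw [(fce_loop_inv k).2, if_neg hn,
        PySem.Int.floordiv_eq_ediv_of_pos (by norm_num)]
    push_cast
    omega
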